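-- pv_equiv track=rewrite | github.com/titouan-gautier/SAH | Comparaison d'Algo/Final/SAE_S1_02_RSA.py | convert_msg
-- ===== SOURCE A (Python) =====
-- def convert_msg(msg):
--     msgcrypte = ""
--     car = ""
--
--     for i in range(len(msg)):
--         car = str(ord(msg[i]))
--         if len(car) != 3:
--             car = "0" + car
--         msgcrypte += car
--
--     while (len(msgcrypte) % 4) != 0:
--         msgcrypte = "0"+msgcrypte
--
--     msgcrypte2 = []
--     while len(msgcrypte) != 0:
--         msgcrypte2.append(msgcrypte[:4])
--         msgcrypte = msgcrypte[4:]
--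
--     return msgcrypte2
-- ===== SOURCE B (Python) =====
-- def convert_msg(msg):
--     def code(c):
--         d = str(ord(c))
--         return d if len(d) == 3 else "0" + d
--     s = "".join(code(c) for c in msg)
--     chunks = []
--     i = len(s)
--     while i > 0:
--         chunks.append(s[max(0, i - 4):i])
--         i -= 4
--     chunks.reverse()
--     if chunks:
--         chunks[0] = chunks[0].rjust(4, "0")
--     return chunks
-- ===== Notes on version B (the rewrite author's own statement) =====
-- stated objective: faster
-- what changed: B joins per-char codes once and chunks the code string right-to-left in place of A's repeated whole-string re-prepending and re-slicing, padding only the leftmost chunk.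
import Mathlib
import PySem

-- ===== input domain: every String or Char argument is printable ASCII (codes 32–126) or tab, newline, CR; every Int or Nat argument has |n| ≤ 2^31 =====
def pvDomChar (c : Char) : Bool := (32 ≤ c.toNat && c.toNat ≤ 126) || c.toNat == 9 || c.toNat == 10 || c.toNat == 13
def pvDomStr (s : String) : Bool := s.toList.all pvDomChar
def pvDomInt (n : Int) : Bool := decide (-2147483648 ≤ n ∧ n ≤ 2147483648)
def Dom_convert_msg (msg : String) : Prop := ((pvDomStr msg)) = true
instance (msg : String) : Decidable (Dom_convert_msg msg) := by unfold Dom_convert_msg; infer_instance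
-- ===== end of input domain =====

-- B builds the encoded string once and chunks it right-to-left, padding only the leftmost chunk:
-- asymptotically faster than A's repeated whole-string re-prepending and re-slicing.

-- termination lemmas cited by the ports' decreasing_by (named so the definition bodies stay small)
theorem pv_pad_aux : ∀ r : Nat, r < 4 → r ≠ 0 → (4 - (r + 1) % 4) % 4 < (4 - r) % 4 := by
  decide

theorem pv_pad_lt (n : Nat) (h : n % 4 ≠ 0) : (4 - (n + 1) % 4) % 4 < (4 - n % 4) % 4 := by
  have e : (n + 1) % 4 = (n % 4 + 1) % 4 := Nat.add_mod n 1 4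
  rw [e]; exact pv_pad_aux (n % 4) (Nat.mod_lt n (by decide)) h

theorem pv_sub4_lt (i : Nat) (h : 0 < i) : i - 4 < i := Nat.sub_lt h (by decide)

theorem pv_drop4_lt (s : List Char) (h : s.length ≠ 0) : (s.drop 4).length < s.length := by
  rw [List.length_drop]; exact Nat.sub_lt (Nat.pos_of_ne_zero h) (by decide)

-- ===== PORT A =====
-- car = str(ord(msg[i])); if len(car) != 3: car = "0" + car; msgcrypte += car
-- (the for-i-in-range(len(msg)) indexing loop reads exactly the chars of msg in order)
def pvCodeA (c : Char) : List Char :=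
  let car := PySem.Int.toChars (c.toNat : Int)
  if car.length ≠ 3 then '0' :: car else car

def pvEncA (cs : List Char) : List Char :=
  cs.foldl (fun acc c => acc ++ pvCodeA c) []

-- while (len(msgcrypte) % 4) != 0: msgcrypte = "0" + msgcrypte
def pvPadA (s : List Char) : List Char :=
  if s.length % 4 ≠ 0 then pvPadA ('0' :: s) else s
termination_by (4 - s.length % 4) % 4
decreasing_by simp only [List.length_cons]; exact pv_pad_lt s.length ‹_›

-- while len(msgcrypte) != 0: append msgcrypte[:4]; msgcrypte = msgcrypte[4:]
-- (s[:4] = take 4, s[4:] = drop 4 — exact for these nonnegative bounds)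
def pvChunkA (s : List Char) : List String :=
  if s.length ≠ 0 then String.ofList (s.take 4) :: pvChunkA (s.drop 4) else []
termination_by s.length
decreasing_by exact pv_drop4_lt s ‹_›

def convert_msg (msg : String) : List String := pvChunkA (pvPadA (pvEncA msg.toList))

-- ===== PORT B =====
def pvCodeB (c : Char) : List Char :=
  let d := PySem.Int.toChars (c.toNat : Int)
  if d.length == 3 then d else '0' :: d

-- while i > 0: chunks.append(s[max(0, i - 4):i]); i -= 4
-- (s[max(0,i-4):i] = (s.drop (i-4)).take (i-(i-4)) with Nat subtraction giving the max — exact)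
def pvChunksRevB (s : List Char) (i : Nat) : List (List Char) :=
  if 0 < i then ((s.drop (i - 4)).take (i - (i - 4))) :: pvChunksRevB s (i - 4) else []
termination_by i
decreasing_by exact pv_sub4_lt i ‹_›

-- chunks[0] = chunks[0].rjust(4, "0") (on a nonempty chunk list)
def pvPadFirstB : List (List Char) → List (List Char)
  | [] => []
  | h :: t => (List.replicate (4 - h.length) '0' ++ h) :: t

-- s = "".join(code(c) for c in msg), used in both places below
def convert_msg_alt (msg : String) : List String :=
  (pvPadFirstB ((pvChunksRevB ((msg.toList.map pvCodeB).flatten)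
      ((msg.toList.map pvCodeB).flatten).length).reverse)).map String.ofList

-- ===== PRECONDITION & SPEC =====
def Spec_convert_msg (msg : String) (out : List String) : Prop := out = convert_msg_alt msg
instance (msg : String) (out : List String) : Decidable (Spec_convert_msg msg out) := by unfold Spec_convert_msg; infer_instance

-- ===== CLAIM (what is proved, stated in full; the proofs are below) =====
def Claim_equal_convert_msg : Prop := ∀ (msg : String), Dom_convert_msg msg → Spec_convert_msg msg (convert_msg msg)

-- ===== LEMMAS AND PROOFS =====

-- B's reversed append-loop, read forward (proof-side helper)
def pvChunksFwd (s : List Char) (i : Nat) : List (List Char) :=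
  if 0 < i then pvChunksFwd s (i - 4) ++ [(s.drop (i - 4)).take (i - (i - 4))] else []
termination_by i
decreasing_by exact pv_sub4_lt i ‹_›

lemma pvChunksRevB_reverse (s : List Char) (i : Nat) :
    (pvChunksRevB s i).reverse = pvChunksFwd s i := by
  induction i using Nat.strong_induction_on with
  | _ i ih =>
    by_cases h : 0 < i
    · rw [pvChunksRevB, pvChunksFwd, if_pos h, if_pos h, List.reverse_cons, ih (i - 4) (by omega)]
    · rw [pvChunksRevB, pvChunksFwd, if_neg h, if_neg h, List.reverse_nil]


lemma pvCode_eq (c : Char) : pvCodeA c = pvCodeB c := by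
  by_cases h : (PySem.Int.toChars (c.toNat : Int)).length = 3 <;>
    simp [pvCodeA, pvCodeB, h]

lemma pvEncA_eq (cs : List Char) : pvEncA cs = (cs.map pvCodeB).flatten := by
  unfold pvEncA
  rw [PySem.List.foldl_append_eq_flatMap]
  simp [List.flatMap_def, funext pvCode_eq]

lemma pvPadA_eq (s : List Char) :
    pvPadA s = List.replicate ((4 - s.length % 4) % 4) '0' ++ s := by
  induction s using pvPadA.induct with
  | case1 s h ih =>
    rw [pvPadA, if_pos h, ih]
    have : (4 - s.length % 4) % 4 = (4 - ('0' :: s).length % 4) % 4 + 1 := by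
      simp [List.length_cons]; omega
    rw [this, List.replicate_succ']
    simp
  | case2 s h =>
    rw [pvPadA, if_neg h]
    have : (4 - s.length % 4) % 4 = 0 := by omega
    simp [this]

lemma pvChunkA_nil : pvChunkA [] = [] := by rw [pvChunkA]; simp

lemma pvChunkA_append (t : List Char) :
    ∀ u : List Char, t.length % 4 = 0 → pvChunkA (t ++ u) = pvChunkA t ++ pvChunkA u := by
  induction t using pvChunkA.induct with
  | case1 t h ih =>
    intro u ht
    have hlen : 4 ≤ t.length := by omega
    conv_lhs => rw [pvChunkA]
    rw [if_pos (by rw [List.length_append]; omega),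
      List.take_append_of_le_length hlen, List.drop_append_of_le_length hlen,
      ih u (by rw [List.length_drop]; omega)]
    conv_rhs => rw [pvChunkA]
    rw [if_pos h]
    simp
  | case2 t h =>
    intro u _
    have h0 : t = [] := List.eq_nil_of_length_eq_zero (by omega)
    simp [h0, pvChunkA_nil]

lemma pvChunkA_four (u : List Char) (hu : u.length = 4) :
    pvChunkA u = [String.ofList u] := by
  rw [pvChunkA, if_pos (by omega), List.take_of_length_le (by omega), pvChunkA,
    if_neg (by simp [hu])]

lemma pvChunksFwd_take (s : List Char) (i : Nat) :
    ∀ m, i ≤ m → pvChunksFwd (s.take m) i = pvChunksFwd s i := by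
  induction i using Nat.strong_induction_on with
  | _ i ih =>
    intro m him
    by_cases h : 0 < i
    · conv_lhs => rw [pvChunksFwd]
      conv_rhs => rw [pvChunksFwd]
      rw [if_pos h, if_pos h, ih (i - 4) (by omega) m (by omega)]
      congr 1
      rw [List.drop_take, List.take_take, Nat.min_def]
      split_ifs with hmin
      · rfl
      · omega
    · conv_lhs => rw [pvChunksFwd]
      conv_rhs => rw [pvChunksFwd]
      rw [if_neg h, if_neg h]

lemma pvChunksFwd_ne_nil (s : List Char) (i : Nat) (hi : 0 < i) :
    pvChunksFwd s i ≠ [] := by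
  rw [pvChunksFwd, if_pos hi]; simp

lemma pvPadFirstB_append (l l₂ : List (List Char)) (h : l ≠ []) :
    pvPadFirstB (l ++ l₂) = pvPadFirstB l ++ l₂ := by
  cases l with
  | nil => simp at h
  | cons a t => simp [pvPadFirstB]

lemma pvMain (s : List Char) :
    (pvPadFirstB (pvChunksFwd s s.length)).map String.ofList
      = pvChunkA (List.replicate ((4 - s.length % 4) % 4) '0' ++ s) := by
  suffices H : ∀ n : Nat, ∀ s : List Char, s.length = n →
      (pvPadFirstB (pvChunksFwd s s.length)).map String.ofList
        = pvChunkA (List.replicate ((4 - s.length % 4) % 4) '0' ++ s) from H s.length s rfl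
  intro n
  induction n using Nat.strong_induction_on with
  | _ n ih =>
    intro s hn
    subst hn
    by_cases h0 : s.length = 0
    · have hs : s = [] := List.eq_nil_of_length_eq_zero h0
      subst hs
      rw [pvChunksFwd]
      simp [pvPadFirstB, pvChunkA_nil]
    · by_cases h4 : s.length ≤ 4
      · -- a single chunk: B pads s itself, A pads the whole (length-4) string
        rw [pvChunksFwd, if_pos (by omega)]
        have hi0 : s.length - 4 = 0 := by omega
        rw [hi0, pvChunksFwd, if_neg (by omega)]
        simp only [List.nil_append, List.drop_zero, Nat.sub_zero, List.take_length,
          pvPadFirstB, List.map_cons, List.map_nil]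
        have hr : (4 - s.length % 4) % 4 = 4 - s.length := by omega
        rw [hr, pvChunkA_four _ (by simp; omega)]
      · -- 4 < length: split off the last 4 characters
        rw [pvChunksFwd, if_pos (by omega)]
        set t := s.take (s.length - 4) with ht
        set u := s.drop (s.length - 4) with hu
        have htl : t.length = s.length - 4 := by rw [ht, List.length_take]; omega
        have hul : u.length = 4 := by rw [hu, List.length_drop]; omega
        have hfwd : pvChunksFwd s (s.length - 4) = pvChunksFwd t t.length := by
          rw [htl, ht, pvChunksFwd_take s (s.length - 4) (s.length - 4) (le_refl _)]
        have hne : pvChunksFwd t t.length ≠ [] := pvChunksFwd_ne_nil _ _ (by omega)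
        have h44 : s.length - (s.length - 4) = 4 := by omega
        have hseg : (s.drop (s.length - 4)).take (s.length - (s.length - 4)) = u := by
          rw [h44, List.take_of_length_le (by rw [List.length_drop]; omega)]
        have hmod : t.length % 4 = s.length % 4 := by omega
        have ihc := ih t.length (by omega) t rfl
        rw [hfwd, hseg, pvPadFirstB_append _ _ hne, List.map_append, ihc, hmod]
        have hsplit : List.replicate ((4 - s.length % 4) % 4) '0' ++ s
            = (List.replicate ((4 - s.length % 4) % 4) '0' ++ t) ++ u := by
          rw [List.append_assoc, ht, hu, List.take_append_drop]
        have hmod2 : (List.replicate ((4 - s.length % 4) % 4) '0' ++ t).length % 4 = 0 := by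
          rw [List.length_append, List.length_replicate, htl]; omega
        rw [hsplit, pvChunkA_append _ u hmod2, pvChunkA_four u hul]
        simp

-- ===== VERDICT (by name: the statement is the Claim_ definition above) =====
theorem convert_msg_spec : Claim_equal_convert_msg := by
  intro msg _
  unfold Spec_convert_msg convert_msg convert_msg_alt
  rw [pvEncA_eq, pvPadA_eq, pvChunksRevB_reverse, pvMain]
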